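-- pv_equiv track=rewrite | github.com/gijsdanoe/gevpro | acc_haiku.py | haiku_check
-- ===== SOURCE A (Python) =====
-- def word_check(tweet, tweetdict):
--     """Checks if the words in the tweet are in the CELEX dictionary."""
--     for word in tweet:
--         if word.lower() not in tweetdict:
--             return False
--     return True
--
-- def count_check(tweet, tweetdict):
--     """Checks if a tweet consists of exactly 17 syllables."""
--     if not word_check(tweet, tweetdict):
--         return False
--     else:
--         total_count = 0
--         for word in tweet:
--             total_count += tweetdict[word.lower()]
--         if total_count == 17:
--             return True
--         else:
--             return False
--
-- def haiku_check(tweet, tweetdict):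
--     """Checks if a tweet is compatible with the haiku format (5-7-5)."""
--     if not count_check(tweet, tweetdict):
--         return False
--     if tweet == []:
--         return False
--     index = 0
--     syltotal = tweetdict[tweet[index].lower()]
--     while True:
--         if syltotal < 5:
--             index += 1
--             syltotal += tweetdict[tweet[index].lower()]
--         elif syltotal == 5:
--             break
--         else:
--             return False
--     index += 1
--     syltotal += tweetdict[tweet[index].lower()]
--     while True:
--         if syltotal < 12:
--             index += 1
--             syltotal += tweetdict[tweet[index].lower()]
--         elif syltotal == 12:
--             return True
--         else:
--             return False
-- ===== SOURCE B (Python) =====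
-- def haiku_check(tweet, tweetdict):
--     """Checks if a tweet is compatible with the haiku format (5-7-5).
--
--     Single pass: walk the words once with a running syllable total and a
--     stage marker (0 = before the 5-boundary, 1 = before the 12-boundary,
--     2 = past both); one dictionary lookup per word."""
--     acc = 0
--     stage = 0
--     for word in tweet:
--         c = tweetdict.get(word.lower())
--         if c is None:
--             return False
--         acc += c
--         if stage == 0:
--             if acc == 5:
--                 stage = 1
--             elif acc > 5:
--                 return False
--         elif stage == 1:
--             if acc == 12:
--                 stage = 2
--             elif acc > 12:
--                 return False
--     return stage == 2 and acc == 17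
-- ===== Notes on version B (the rewrite author's own statement) =====
-- stated objective: simpler
-- what changed: Replaced A's four traversals (membership pass, sum pass, two index-juggling while loops re-reading the dict) by one single pass over the words with a running total and a stage marker for the 5- and 12-boundaries, one dict lookup per word.
import Mathlib
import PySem

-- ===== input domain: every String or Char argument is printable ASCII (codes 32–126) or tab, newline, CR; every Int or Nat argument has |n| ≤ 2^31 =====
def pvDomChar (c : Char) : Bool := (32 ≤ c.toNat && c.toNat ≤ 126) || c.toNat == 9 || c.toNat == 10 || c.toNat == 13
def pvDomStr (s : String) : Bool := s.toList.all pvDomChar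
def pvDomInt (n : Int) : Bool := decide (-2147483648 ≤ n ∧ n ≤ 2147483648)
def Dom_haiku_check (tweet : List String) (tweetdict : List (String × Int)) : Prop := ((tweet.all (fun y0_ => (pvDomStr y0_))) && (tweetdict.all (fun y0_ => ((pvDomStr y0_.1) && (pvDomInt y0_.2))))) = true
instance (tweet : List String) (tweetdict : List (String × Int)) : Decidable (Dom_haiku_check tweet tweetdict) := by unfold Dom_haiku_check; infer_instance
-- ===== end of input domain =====

-- B replaces A's four traversals (membership pass, sum pass, two boundary while loops)
-- by one single pass with a running total and a stage marker; same result on every input.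

-- dict lookup (first match in the association list) shared by both ports
def dget (tweetdict : List (String × Int)) (k : String) : Option Int :=
  (tweetdict.find? (fun p => p.1 == k)).map (·.2)

-- syllable count of a word; in A the raw tweetdict[word.lower()] access is always
-- guarded by word_check, so the lookup is present wherever A evaluates it
def cnt (tweetdict : List (String × Int)) (w : String) : Int :=
  (dget tweetdict (PySem.Str.lower w)).getD 0

-- ===== PORT A =====
def word_check (tweet : List String) (tweetdict : List (String × Int)) : Bool :=
  match tweet with
  | [] => true
  | w :: ws =>
    if (dget tweetdict (PySem.Str.lower w)).isSome then word_check ws tweetdict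
    else false

def count_check (tweet : List String) (tweetdict : List (String × Int)) : Bool :=
  if word_check tweet tweetdict = false then false
  else
    let total := tweet.foldl (fun a w => a + cnt tweetdict w) 0
    decide (total = 17)

-- A's second 'while True' loop; fuel bounds the loop (the index grows each step and
-- a failed tweet[index+1] access — Python's IndexError, unreachable past count_check — gives false)
def loopA2 (tweet : List String) (tweetdict : List (String × Int)) :
    Nat → Nat → Int → Bool
  | 0, _, syltotal =>
    if syltotal < 12 then false  -- out of fuel: the tweet[index+1] access would fail (unreachable past count_check)
    else decide (syltotal = 12)
  | f + 1, index, syltotal =>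
    if syltotal < 12 then
      match tweet[index + 1]? with
      | some w => loopA2 tweet tweetdict f (index + 1) (syltotal + cnt tweetdict w)
      | none => false  -- Python's IndexError, unreachable past count_check
    else decide (syltotal = 12)

-- A's first 'while True' loop; on break (== 5) A advances once more and enters the second loop
def loopA1 (tweet : List String) (tweetdict : List (String × Int)) :
    Nat → Nat → Int → Bool
  | 0, index, syltotal =>
    if syltotal < 5 then false  -- out of fuel (unreachable past count_check)
    else if syltotal = 5 then
      match tweet[index + 1]? with
      | some w => loopA2 tweet tweetdict 0 (index + 1) (syltotal + cnt tweetdict w)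
      | none => false
    else false
  | f + 1, index, syltotal =>
    if syltotal < 5 then
      match tweet[index + 1]? with
      | some w => loopA1 tweet tweetdict f (index + 1) (syltotal + cnt tweetdict w)
      | none => false  -- Python's IndexError, unreachable past count_check
    else if syltotal = 5 then
      match tweet[index + 1]? with
      | some w => loopA2 tweet tweetdict f (index + 1) (syltotal + cnt tweetdict w)
      | none => false
    else false

def haiku_check (tweet : List String) (tweetdict : List (String × Int)) : Bool :=
  if count_check tweet tweetdict = false then false
  else
    match tweet with
    | [] => false
    | t :: _ => loopA1 tweet tweetdict tweet.length 0 (cnt tweetdict t)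

-- ===== PORT B =====
-- single pass: stage 0 = before the 5-boundary, 1 = before the 12-boundary, 2 = past both
def goB (tweetdict : List (String × Int)) :
    List String → Int → Nat → Bool
  | [], acc, stage => decide (stage = 2) && decide (acc = 17)
  | w :: ws, acc, stage =>
    match dget tweetdict (PySem.Str.lower w) with
    | none => false
    | some c =>
      let acc' := acc + c
      if stage = 0 then
        if acc' = 5 then goB tweetdict ws acc' 1
        else if acc' > 5 then false
        else goB tweetdict ws acc' 0
      else if stage = 1 then
        if acc' = 12 then goB tweetdict ws acc' 2
        else if acc' > 12 then false
        else goB tweetdict ws acc' 1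
      else goB tweetdict ws acc' stage

def haiku_check_alt (tweet : List String) (tweetdict : List (String × Int)) : Bool :=
  goB tweetdict tweet 0 0

-- ===== PRECONDITION & SPEC =====
def Spec_haiku_check (tweet : List String) (tweetdict : List (String × Int)) (out : Bool) : Prop := out = haiku_check_alt tweet tweetdict
instance (tweet : List String) (tweetdict : List (String × Int)) (out : Bool) : Decidable (Spec_haiku_check tweet tweetdict out) := by unfold Spec_haiku_check; infer_instance

-- ===== CLAIM (what is proved, stated in full; the proofs are below) =====
def Claim_equal_haiku_check : Prop := ∀ (tweet : List String) (tweetdict : List (String × Int)), Dom_haiku_check tweet tweetdict → Spec_haiku_check tweet tweetdict (haiku_check tweet tweetdict)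

-- ===== LEMMAS AND PROOFS =====
-- clean suffix-level semantics of A's two loops
def S2 (d : List (String × Int)) (syl : Int) (ws : List String) : Bool :=
  if syl < 12 then
    match ws with
    | [] => false
    | w :: r => S2 d (syl + cnt d w) r
  else decide (syl = 12)

def S1 (d : List (String × Int)) (syl : Int) (ws : List String) : Bool :=
  if syl < 5 then
    match ws with
    | [] => false
    | w :: r => S1 d (syl + cnt d w) r
  else if syl = 5 then
    match ws with
    | [] => false
    | w :: r => S2 d (syl + cnt d w) r
  else false

def allPresent (d : List (String × Int)) (ws : List String) : Prop :=
  ∀ w ∈ ws, (dget d (PySem.Str.lower w)).isSome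

def sumc (d : List (String × Int)) (ws : List String) : Int :=
  (ws.map (cnt d)).sum

theorem sumc_cons (d : List (String × Int)) (w : String) (ws : List String) :
    sumc d (w :: ws) = cnt d w + sumc d ws := by simp [sumc]

theorem loopA2_eq_S2 (tweet : List String) (d : List (String × Int)) :
    ∀ (f i : Nat) (syl : Int), tweet.length ≤ i + f →
      loopA2 tweet d f i syl = S2 d syl (tweet.drop (i + 1)) := by
  intro f
  induction f with
  | zero =>
    intro i syl h
    have hd : tweet.drop (i + 1) = [] := List.drop_eq_nil_of_le (by omega)
    rw [hd, loopA2, S2.eq_def]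
  | succ f ih =>
    intro i syl h
    rw [loopA2, S2.eq_def]
    split
    · rcases h' : tweet[i + 1]? with _ | w
      · have hd : tweet.drop (i + 1) = [] :=
          List.drop_eq_nil_of_le (List.getElem?_eq_none_iff.mp h')
        rw [hd]
      · have hlt := (List.getElem?_eq_some_iff.mp h').1
        have hd : tweet.drop (i + 1) = w :: tweet.drop (i + 2) := by
          rw [List.drop_eq_getElem_cons hlt]
          simp [(List.getElem?_eq_some_iff.mp h').2]
        rw [hd]
        exact ih (i + 1) (syl + cnt d w) (by omega)
    · rfl

theorem loopA1_eq_S1 (tweet : List String) (d : List (String × Int)) :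
    ∀ (f i : Nat) (syl : Int), tweet.length ≤ i + f →
      loopA1 tweet d f i syl = S1 d syl (tweet.drop (i + 1)) := by
  intro f
  induction f with
  | zero =>
    intro i syl h
    have hd : tweet.drop (i + 1) = [] := List.drop_eq_nil_of_le (by omega)
    have hn : tweet[i + 1]? = none := List.getElem?_eq_none_iff.mpr (by omega)
    rw [hd, loopA1, S1.eq_def, hn]
  | succ f ih =>
    intro i syl h
    rw [loopA1, S1.eq_def]
    split
    · rcases h' : tweet[i + 1]? with _ | w
      · have hd : tweet.drop (i + 1) = [] :=
          List.drop_eq_nil_of_le (List.getElem?_eq_none_iff.mp h')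
        rw [hd]
      · have hlt := (List.getElem?_eq_some_iff.mp h').1
        have hd : tweet.drop (i + 1) = w :: tweet.drop (i + 2) := by
          rw [List.drop_eq_getElem_cons hlt]
          simp [(List.getElem?_eq_some_iff.mp h').2]
        rw [hd]
        exact ih (i + 1) (syl + cnt d w) (by omega)
    · split
      · rcases h' : tweet[i + 1]? with _ | w
        · have hd : tweet.drop (i + 1) = [] :=
            List.drop_eq_nil_of_le (List.getElem?_eq_none_iff.mp h')
          rw [hd]
        · have hlt := (List.getElem?_eq_some_iff.mp h').1
          have hd : tweet.drop (i + 1) = w :: tweet.drop (i + 2) := by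
            rw [List.drop_eq_getElem_cons hlt]
            simp [(List.getElem?_eq_some_iff.mp h').2]
          rw [hd]
          exact loopA2_eq_S2 tweet d f (i + 1) _ (by omega)
      · rfl

-- a missing word makes B false (every branch of goB ends in false or recurses)
theorem goB_missing (d : List (String × Int)) :
    ∀ (ws : List String) (acc : Int) (stage : Nat),
      (∃ w ∈ ws, dget d (PySem.Str.lower w) = none) → goB d ws acc stage = false := by
  intro ws
  induction ws with
  | nil => intro acc stage h; simp at h
  | cons w r ih =>
    intro acc stage h
    rw [goB]
    rcases h with ⟨w', hw', hn⟩
    rcases List.mem_cons.mp hw' with rfl | hmem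
    · rw [hn]
    · rcases hc : dget d (PySem.Str.lower w) with _ | c
      · rfl
      · have hr : ∃ x ∈ r, dget d (PySem.Str.lower x) = none := ⟨w', hmem, hn⟩
        simp only []
        split_ifs <;> first | rfl | exact ih _ _ hr

-- a wrong total makes B false
theorem goB_not17 (d : List (String × Int)) :
    ∀ (ws : List String) (acc : Int) (stage : Nat),
      acc + sumc d ws ≠ 17 → goB d ws acc stage = false := by
  intro ws
  induction ws with
  | nil =>
    intro acc stage h
    simp [sumc] at h
    simp [goB, h]
  | cons w r ih =>
    intro acc stage h
    rw [goB]
    rcases hc : dget d (PySem.Str.lower w) with _ | c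
    · rfl
    · have hcw : cnt d w = c := by simp [cnt, hc]
      have h' : (acc + c) + sumc d r ≠ 17 := by
        rw [sumc_cons, hcw] at h; omega
      simp only []
      split_ifs <;> first | rfl | exact ih _ _ h'

-- stage 2: B just verifies the remaining words are present and the total is 17
theorem goB_stage2 (d : List (String × Int)) :
    ∀ (ws : List String) (acc : Int), allPresent d ws →
      goB d ws acc 2 = decide (acc + sumc d ws = 17) := by
  intro ws
  induction ws with
  | nil => intro acc _; simp [goB, sumc]
  | cons w r ih =>
    intro acc hp
    rcases hc : dget d (PySem.Str.lower w) with _ | c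
    · exact absurd (hp w (by simp)) (by simp [hc])
    · have hcw : cnt d w = c := by simp [cnt, hc]
      have hp' : allPresent d r := fun x hx => hp x (List.mem_cons_of_mem _ hx)
      rw [goB]
      simp only [hc]
      rw [ih (acc + c) hp', sumc_cons, hcw, ← add_assoc]
      simp

-- stage 1 agrees with A's second loop
theorem goB_stage1 (d : List (String × Int)) :
    ∀ (ws : List String) (acc : Int), allPresent d ws →
      acc + sumc d ws = 17 → acc < 12 → goB d ws acc 1 = S2 d acc ws := by
  intro ws
  induction ws with
  | nil =>
    intro acc _ _ hlt
    rw [goB, S2.eq_def, if_pos hlt]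
    simp
  | cons w r ih =>
    intro acc hp hs hlt
    rcases hc : dget d (PySem.Str.lower w) with _ | c
    · exact absurd (hp w (by simp)) (by simp [hc])
    · have hcw : cnt d w = c := by simp [cnt, hc]
      have hp' : allPresent d r := fun x hx => hp x (List.mem_cons_of_mem _ hx)
      have hs' : (acc + c) + sumc d r = 17 := by rw [sumc_cons, hcw] at hs; omega
      rw [goB]
      simp only [hc]
      simp only [reduceIte]
      rw [S2.eq_def, if_pos hlt]
      simp only [hcw]
      by_cases h12 : acc + c = 12
      · rw [if_pos h12, goB_stage2 d r _ hp', S2.eq_def, if_neg (by omega)]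
        simp [h12]
        omega
      · by_cases hgt : acc + c > 12
        · rw [if_neg h12, if_pos hgt, S2.eq_def]
          rw [if_neg (show ¬ acc + c < 12 by omega)]
          simp [h12]
        · rw [if_neg h12, if_neg hgt, ih (acc + c) hp' hs' (by omega)]
          simp

-- stage 0 agrees with A's first loop
theorem goB_stage0 (d : List (String × Int)) :
    ∀ (ws : List String) (acc : Int), allPresent d ws →
      acc + sumc d ws = 17 → acc < 5 → goB d ws acc 0 = S1 d acc ws := by
  intro ws
  induction ws with
  | nil =>
    intro acc _ _ hlt
    rw [goB, S1.eq_def, if_pos hlt]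
    simp
  | cons w r ih =>
    intro acc hp hs hlt
    rcases hc : dget d (PySem.Str.lower w) with _ | c
    · exact absurd (hp w (by simp)) (by simp [hc])
    · have hcw : cnt d w = c := by simp [cnt, hc]
      have hp' : allPresent d r := fun x hx => hp x (List.mem_cons_of_mem _ hx)
      have hs' : (acc + c) + sumc d r = 17 := by rw [sumc_cons, hcw] at hs; omega
      rw [goB]
      simp only [hc]
      simp only [reduceIte]
      rw [S1.eq_def, if_pos hlt]
      simp only [hcw]
      by_cases h5 : acc + c = 5
      · rw [if_pos h5, goB_stage1 d r _ hp' hs' (by omega)]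
        rw [S1.eq_def, if_neg (by omega), if_pos h5]
        cases r with
        | nil => rw [S2.eq_def, if_pos (by omega)]
        | cons w' r' =>
          rw [S2.eq_def, if_pos (by omega)]
      · by_cases hgt : acc + c > 5
        · rw [if_neg h5, if_pos hgt, S1.eq_def, if_neg (by omega), if_neg h5]
        · rw [if_neg h5, if_neg hgt, ih (acc + c) hp' hs' (by omega)]

theorem word_check_true (tweet : List String) (d : List (String × Int)) :
    word_check tweet d = true ↔ allPresent d tweet := by
  induction tweet with
  | nil => simp [word_check, allPresent]
  | cons w r ih =>
    rw [word_check]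
    constructor
    · intro h
      split at h
      · intro x hx
        rcases List.mem_cons.mp hx with rfl | hx'
        · assumption
        · exact (ih.mp h) x hx'
      · exact absurd h (by simp)
    · intro h
      rw [if_pos (h w (by simp))]
      exact ih.mpr (fun x hx => h x (List.mem_cons_of_mem _ hx))

theorem foldl_cnt (d : List (String × Int)) :
    ∀ (ws : List String) (a : Int),
      ws.foldl (fun a w => a + cnt d w) a = a + sumc d ws := by
  intro ws
  induction ws with
  | nil => intro a; simp [sumc]
  | cons w r ih => intro a; simp [List.foldl, ih, sumc_cons]; omega

theorem count_check_true (tweet : List String) (d : List (String × Int)) :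
    count_check tweet d = true ↔ (allPresent d tweet ∧ sumc d tweet = 17) := by
  rw [count_check]
  by_cases hw : word_check tweet d = true
  · rw [if_neg (by simp [hw])]
    simp [foldl_cnt, (word_check_true tweet d).mp hw]
  · rw [if_pos (by revert hw; cases word_check tweet d <;> simp)]
    simp
    intro hp
    exact absurd ((word_check_true tweet d).mpr hp) hw

-- ===== VERDICT (by name: the statement is the Claim_ definition above) =====
theorem haiku_check_spec : Claim_equal_haiku_check := by
  intro tweet d _
  unfold Spec_haiku_check haiku_check haiku_check_alt
  by_cases hcc : count_check tweet d = true
  · rw [if_neg (by simp [hcc])]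
    obtain ⟨hp, hs⟩ := (count_check_true tweet d).mp hcc
    rw [goB_stage0 d tweet 0 hp (by omega) (by norm_num)]
    cases tweet with
    | nil => simp [sumc] at hs
    | cons t r =>
      change loopA1 (t :: r) d (t :: r).length 0 (cnt d t) = S1 d 0 (t :: r)
      rw [loopA1_eq_S1 (t :: r) d (t :: r).length 0 (cnt d t) (by simp)]
      conv_rhs => rw [S1.eq_def]
      simp
  · have hcc' : count_check tweet d = false := by
      revert hcc; cases count_check tweet d <;> simp
    rw [if_pos hcc']
    by_cases hp : allPresent d tweet
    · have hs : sumc d tweet ≠ 17 := fun h17 =>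
        hcc ((count_check_true tweet d).mpr ⟨hp, h17⟩)
      exact (goB_not17 d tweet 0 0 (by omega)).symm
    · have hmiss : ∃ w ∈ tweet, dget d (PySem.Str.lower w) = none := by
        simp only [allPresent] at hp
        push Not at hp
        obtain ⟨w, hw, hn⟩ := hp
        exact ⟨w, hw, by revert hn; cases dget d (PySem.Str.lower w) <;> simp⟩
      exact (goB_missing d tweet 0 0 hmiss).symm
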